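-- pv_equiv track=rewrite | github.com/NeckofNickey/algorithms | search/cleaning_day.py | get_min_max_inconvenience
-- ===== SOURCE A (Python) =====
-- def get_min_max_inconvenience(n, r, c, heights_list):
--
--     heights_list.sort()
--
--     left = 0
--     right = heights_list[-1] - heights_list[0]
--     answer = right
--
--     def is_possible(max_diff):
--         brigades = 0
--         i = 0
--
--         while i <= n - c:
--             if heights_list[i + c - 1] - heights_list[i] <= max_diff:
--                 brigades += 1
--                 i += c
--             else:
--                 i += 1
--             if brigades >= r:
--                 return True
--
--         return brigades >= r
--
--
--     while left <= right:
--         mid = (left + right) // 2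
--         if is_possible(mid):
--             answer = mid
--             right = mid - 1
--         else:
--             left = mid + 1
--
--     return answer
-- ===== SOURCE B (Python) =====
-- def get_min_max_inconvenience(n, r, c, heights_list):
--     heights_list.sort()
--     hs = heights_list
--     full_span = hs[-1] - hs[0]
--
--     def brigades(max_diff):
--         count = 0
--         i = 0
--         while i <= n - c:
--             if hs[i + c - 1] - hs[i] <= max_diff:
--                 count += 1
--                 i += c
--             else:
--                 i += 1
--         return count
--
--     if brigades(0) >= r:
--         return 0
--
--     gaps = sorted({hs[i + c - 1] - hs[i] for i in range(n - c + 1)})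
--     lo, hi = 0, len(gaps)
--     while lo < hi:
--         mid = (lo + hi) // 2
--         if brigades(gaps[mid]) >= r:
--             hi = mid
--         else:
--             lo = mid + 1
--     return gaps[lo] if lo < len(gaps) else full_span
-- ===== Notes on version B (the rewrite author's own statement) =====
-- stated objective: alternative
-- what changed: Replaces the binary search over the whole integer value range [0, max-min] by a search over the sorted deduplicated list of candidate window gaps heights[i+c-1]-heights[i] (fast path for max_diff 0, bisect that list for the smallest feasible gap, full span as infeasible default); the feasibility helper counts all brigades instead of early-exiting.
-- outside the precondition, e.g. on get_min_max_inconvenience(2, 1, 1, [5]): A returns 0, B raises IndexError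
import Mathlib
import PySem

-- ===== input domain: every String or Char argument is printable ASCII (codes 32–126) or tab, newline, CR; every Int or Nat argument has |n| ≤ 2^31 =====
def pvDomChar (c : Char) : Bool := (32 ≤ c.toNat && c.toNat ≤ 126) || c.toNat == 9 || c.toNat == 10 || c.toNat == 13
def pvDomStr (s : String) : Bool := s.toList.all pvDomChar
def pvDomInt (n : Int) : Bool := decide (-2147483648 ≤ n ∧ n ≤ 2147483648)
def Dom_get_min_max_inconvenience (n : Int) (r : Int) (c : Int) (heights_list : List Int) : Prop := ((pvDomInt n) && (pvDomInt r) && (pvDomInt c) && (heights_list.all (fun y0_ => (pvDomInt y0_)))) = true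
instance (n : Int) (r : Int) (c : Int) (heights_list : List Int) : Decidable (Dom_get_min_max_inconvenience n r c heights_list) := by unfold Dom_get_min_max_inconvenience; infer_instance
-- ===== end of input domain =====

-- B replaces A's binary search over the integer value range [0, max-min] by a bisection over the
-- sorted deduplicated list of candidate window gaps (objective: alternative algorithm, similar cost).
-- Both A and B sort heights_list in place (same observable mutation); the theorems are about the return value.


-- ===== PORT A =====
-- A's inner `is_possible` while-loop (early exit as soon as brigades >= r); fuel only makes the
-- recursion total — under Pre_ (1 ≤ c) the index strictly increases and the fuel never runs out.
def pvAPossLoop (hs : List Int) (n c r d : Int) : Nat → Int → Int → Bool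
  | 0, _, brigades => decide (brigades ≥ r)
  | fuel+1, i, brigades =>
    if i ≤ n - c then
      if PySem.List.pyGetD hs (i + c - 1) 0 - PySem.List.pyGetD hs i 0 ≤ d then
        if brigades + 1 ≥ r then true
        else pvAPossLoop hs n c r d fuel (i + c) (brigades + 1)
      else
        if brigades ≥ r then true
        else pvAPossLoop hs n c r d fuel (i + 1) brigades
    else decide (brigades ≥ r)

-- A's outer `while left <= right` binary-search loop; fuel is an upper bound on the iterations.
def pvABsearch (P : Int → Bool) : Nat → Int → Int → Int → Int
  | 0, _, _, answer => answer
  | fuel+1, left, right, answer =>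
    if left ≤ right then
      let mid := PySem.Int.floordiv (left + right) 2
      if P mid then pvABsearch P fuel left (mid - 1) mid
      else pvABsearch P fuel (mid + 1) right answer
    else answer

def get_min_max_inconvenience (n : Int) (r : Int) (c : Int) (heights_list : List Int) : Int :=
  let hs := PySem.List.sorted heights_list (fun x => x) false
  -- heights_list[-1] / heights_list[0]: IndexError on [] is excluded by Pre_ (getD is never reached there)
  let right := PySem.List.pyGetD hs (-1) 0 - PySem.List.pyGetD hs 0 0
  pvABsearch (fun d => pvAPossLoop hs n c r d (hs.length + 1) 0 0) (right + 2).toNat 0 right right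

-- ===== PORT B =====
-- B's `brigades` helper: full greedy count, no early exit (fuel as above).
def pvBBrigLoop (hs : List Int) (n c d : Int) : Nat → Int → Int → Int
  | 0, _, count => count
  | fuel+1, i, count =>
    if i ≤ n - c then
      if PySem.List.pyGetD hs (i + c - 1) 0 - PySem.List.pyGetD hs i 0 ≤ d then
        pvBBrigLoop hs n c d fuel (i + c) (count + 1)
      else pvBBrigLoop hs n c d fuel (i + 1) count
    else count

-- B's `while lo < hi` bisection over the candidate-gap list.
def pvBBisect (gaps : List Int) (feas : Int → Bool) : Nat → Int → Int → Int
  | 0, lo, _ => lo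
  | fuel+1, lo, hi =>
    if lo < hi then
      let mid := PySem.Int.floordiv (lo + hi) 2
      if feas (PySem.List.pyGetD gaps mid 0) then pvBBisect gaps feas fuel lo mid
      else pvBBisect gaps feas fuel (mid + 1) hi
    else lo

def get_min_max_inconvenience_alt (n : Int) (r : Int) (c : Int) (heights_list : List Int) : Int :=
  let hs := PySem.List.sorted heights_list (fun x => x) false
  let full_span := PySem.List.pyGetD hs (-1) 0 - PySem.List.pyGetD hs 0 0
  let brig := fun d => pvBBrigLoop hs n c d (hs.length + 1) 0 0
  if brig 0 ≥ r then 0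
  else
    let gaps := PySem.List.sorted
      (PySem.Set.ofList ((PySem.List.pyRange 0 (n - c + 1) 1).map
        (fun i => PySem.List.pyGetD hs (i + c - 1) 0 - PySem.List.pyGetD hs i 0)))
      (fun x => x) false
    let lo := pvBBisect gaps (fun g => decide (brig g ≥ r)) (gaps.length + 1) 0 (gaps.length : Int)
    if lo < (gaps.length : Int) then PySem.List.pyGetD gaps lo 0 else full_span

-- ===== PRECONDITION & SPEC =====
-- Pre_ excludes: the empty list (A raises IndexError); c ≤ 0 with c ≤ n (A's greedy while-loop
-- can then loop forever); and n > len(heights_list) with c ≤ n, where A indexes out of range or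
-- returns an early-exit accident that B's gap construction cannot reach (B raises IndexError there).
def Pre_get_min_max_inconvenience (n : Int) (r : Int) (c : Int) (heights_list : List Int) : Prop :=
  heights_list ≠ [] ∧ ((1 ≤ c ∧ n ≤ (heights_list.length : Int)) ∨ n < c)
instance (n : Int) (r : Int) (c : Int) (heights_list : List Int) : Decidable (Pre_get_min_max_inconvenience n r c heights_list) := by unfold Pre_get_min_max_inconvenience; infer_instance

def pvWitness_get_min_max_inconvenience : Int × Int × Int × List Int := (4, 2, 2, [1, 5, 2, 11])

def Spec_get_min_max_inconvenience (n : Int) (r : Int) (c : Int) (heights_list : List Int) (out : Int) : Prop := out = get_min_max_inconvenience_alt n r c heights_list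
instance (n : Int) (r : Int) (c : Int) (heights_list : List Int) (out : Int) : Decidable (Spec_get_min_max_inconvenience n r c heights_list out) := by unfold Spec_get_min_max_inconvenience; infer_instance

-- ===== CLAIM (what is proved, stated in full; the proofs are below) =====
def Claim_equal_get_min_max_inconvenience : Prop := ∀ (n : Int) (r : Int) (c : Int) (heights_list : List Int), Dom_get_min_max_inconvenience n r c heights_list → Pre_get_min_max_inconvenience n r c heights_list → Spec_get_min_max_inconvenience n r c heights_list (get_min_max_inconvenience n r c heights_list)

-- ===== LEMMAS AND PROOFS =====

def pvGap (hs : List Int) (c i : Int) : Int :=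
  PySem.List.pyGetD hs (i + c - 1) 0 - PySem.List.pyGetD hs i 0

def pvGci (hs : List Int) (n c d i : Int) : Int :=
  if h : 1 ≤ c ∧ i ≤ n - c then
    if pvGap hs c i ≤ d then 1 + pvGci hs n c d (i + c) else pvGci hs n c d (i + 1)
  else 0
termination_by (n - c + 1 - i).toNat
decreasing_by all_goals omega

def pvDp (hs : List Int) (n c d i : Int) : Int :=
  if h : 1 ≤ c ∧ i ≤ n - c then
    if pvGap hs c i ≤ d then
      max (pvDp hs n c d (i + 1)) (1 + pvDp hs n c d (i + c))
    else pvDp hs n c d (i + 1)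
  else 0
termination_by (n - c + 1 - i).toNat
decreasing_by all_goals omega

theorem pvGci_nonneg (hs : List Int) (n c d i : Int) : 0 ≤ pvGci hs n c d i := by
  fun_induction pvGci <;> omega

theorem pvDp_nonneg (hs : List Int) (n c d i : Int) : 0 ≤ pvDp hs n c d i := by
  fun_induction pvDp <;> omega

theorem pvDp_zero (hs : List Int) (n c d i : Int) (h : ¬(1 ≤ c ∧ i ≤ n - c)) :
    pvDp hs n c d i = 0 := by
  rw [pvDp, dif_neg h]

theorem pvDp_step (hs : List Int) (n c d i : Int) :
    pvDp hs n c d (i + 1) ≤ pvDp hs n c d i := by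
  conv_rhs => rw [pvDp]
  split
  · split
    · exact le_max_left _ _
    · exact le_refl _
  · rename_i h
    rw [pvDp_zero hs n c d (i+1) (by omega)]

theorem pvDp_start_mono (hs : List Int) (n c d : Int) :
    ∀ (k : Nat) (i j : Int), j = i + k → pvDp hs n c d j ≤ pvDp hs n c d i := by
  intro k
  induction k with
  | zero => intro i j h; simp at h; exact le_of_eq (by rw [h])
  | succ m ih =>
    intro i j h
    calc pvDp hs n c d j ≤ pvDp hs n c d (i + 1) := ih (i+1) j (by omega)
    _ ≤ pvDp hs n c d i := pvDp_step hs n c d i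

theorem pvDp_le_of_le (hs : List Int) (n c d : Int) (i j : Int) (h : i ≤ j) :
    pvDp hs n c d j ≤ pvDp hs n c d i :=
  pvDp_start_mono hs n c d (j - i).toNat i j (by omega)

theorem pvGci_unfold_pos (hs : List Int) (n c d i : Int) (h : 1 ≤ c ∧ i ≤ n - c)
    (hg : pvGap hs c i ≤ d) : pvGci hs n c d i = 1 + pvGci hs n c d (i + c) := by
  rw [pvGci]; rw [dif_pos h, if_pos hg]

theorem pvGci_unfold_neg (hs : List Int) (n c d i : Int) (h : 1 ≤ c ∧ i ≤ n - c)
    (hg : ¬(pvGap hs c i ≤ d)) : pvGci hs n c d i = pvGci hs n c d (i + 1) := by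
  rw [pvGci]; rw [dif_pos h, if_neg hg]

theorem pvGci_zero (hs : List Int) (n c d i : Int) (h : ¬(1 ≤ c ∧ i ≤ n - c)) :
    pvGci hs n c d i = 0 := by
  rw [pvGci, dif_neg h]

theorem pvDp_unfold_pos (hs : List Int) (n c d i : Int) (h : 1 ≤ c ∧ i ≤ n - c)
    (hg : pvGap hs c i ≤ d) :
    pvDp hs n c d i = max (pvDp hs n c d (i + 1)) (1 + pvDp hs n c d (i + c)) := by
  rw [pvDp]; rw [dif_pos h, if_pos hg]

theorem pvDp_unfold_neg (hs : List Int) (n c d i : Int) (h : 1 ≤ c ∧ i ≤ n - c)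
    (hg : ¬(pvGap hs c i ≤ d)) : pvDp hs n c d i = pvDp hs n c d (i + 1) := by
  rw [pvDp]; rw [dif_pos h, if_neg hg]

theorem pvDp_first_pick (hs : List Int) (n c d : Int) :
    ∀ i, 0 < pvDp hs n c d i →
    ∃ p, i ≤ p ∧ p ≤ n - c ∧ pvGap hs c p ≤ d ∧ pvDp hs n c d i = 1 + pvDp hs n c d (p + c) := by
  intro i
  fun_induction pvDp hs n c d i with
  | case1 i h hgap ih1 ih2 =>
    intro _
    rcases le_total (pvDp hs n c d (i+1)) (1 + pvDp hs n c d (i+c)) with hle | hle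
    · exact ⟨i, le_refl _, h.2, hgap, by omega⟩
    · have hmax : max (pvDp hs n c d (i + 1)) (1 + pvDp hs n c d (i + c)) = pvDp hs n c d (i+1) := by omega
      rw [hmax]
      have hpos : 0 < pvDp hs n c d (i+1) := by
        have := pvDp_nonneg hs n c d (i+c); omega
      obtain ⟨p, hp1, hp2, hp3, hp4⟩ := ih1 hpos
      exact ⟨p, by omega, hp2, hp3, hp4⟩
  | case2 i h hgap ih =>
    intro hpos
    obtain ⟨p, hp1, hp2, hp3, hp4⟩ := ih hpos
    exact ⟨p, by omega, hp2, hp3, hp4⟩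
  | case3 i h => intro hpos; omega

theorem pvDp_succ_le (hs : List Int) (n c d i : Int) :
    pvDp hs n c d (i + 1) ≤ 1 + pvDp hs n c d (i + c) := by
  by_cases h : pvDp hs n c d (i+1) ≤ 0
  · have := pvDp_nonneg hs n c d (i+c); omega
  · push Not at h
    obtain ⟨p, hp1, hp2, hp3, hp4⟩ := pvDp_first_pick hs n c d (i+1) h
    have := pvDp_le_of_le hs n c d (i+c) (p+c) (by omega)
    omega

theorem pvGci_eq_dp (hs : List Int) (n c d : Int) :
    ∀ i, pvGci hs n c d i = pvDp hs n c d i := by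
  intro i
  fun_induction pvGci hs n c d i with
  | case1 i h hgap ih =>
    rw [pvDp_unfold_pos hs n c d i h hgap]
    have := pvDp_succ_le hs n c d i
    rw [ih]
    omega
  | case2 i h hgap ih =>
    rw [pvDp_unfold_neg hs n c d i h hgap, ih]
  | case3 i h => rw [pvDp_zero hs n c d i h]

theorem pvDp_d_mono (hs : List Int) (n c : Int) (d d' : Int) (hdd : d ≤ d') :
    ∀ i, pvDp hs n c d i ≤ pvDp hs n c d' i := by
  intro i
  fun_induction pvDp hs n c d i with
  | case1 i h hgap ih1 ih2 =>
    rw [pvDp_unfold_pos hs n c d' i h (le_trans hgap hdd)]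
    omega
  | case2 i h hgap ih =>
    have hstep := pvDp_step hs n c d' i
    omega
  | case3 i h => rw [pvDp_zero hs n c d' i h]

theorem pvGci_d_mono (hs : List Int) (n c : Int) (d d' : Int) (hdd : d ≤ d') (i : Int) :
    pvGci hs n c d i ≤ pvGci hs n c d' i := by
  rw [pvGci_eq_dp, pvGci_eq_dp]; exact pvDp_d_mono hs n c d d' hdd i

theorem pvGci_congr (hs : List Int) (n c : Int) (d d' : Int) :
    ∀ i, (∀ j, i ≤ j → j ≤ n - c → (pvGap hs c j ≤ d ↔ pvGap hs c j ≤ d')) →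
    pvGci hs n c d i = pvGci hs n c d' i := by
  intro i
  fun_induction pvGci hs n c d i with
  | case1 i h hgap ih =>
    intro hyp
    rw [pvGci_unfold_pos hs n c d' i h ((hyp i (le_refl _) h.2).mp hgap)]
    rw [ih (fun j hj1 hj2 => hyp j (by omega) hj2)]
  | case2 i h hgap ih =>
    intro hyp
    rw [pvGci_unfold_neg hs n c d' i h (fun hx => hgap ((hyp i (le_refl _) h.2).mpr hx))]
    rw [ih (fun j hj1 hj2 => hyp j (by omega) hj2)]
  | case3 i h => intro _; rw [pvGci_zero hs n c d' i h]

theorem pvGci_zero_of_no_gap (hs : List Int) (n c d : Int) :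
    ∀ i, (∀ j, i ≤ j → j ≤ n - c → ¬(pvGap hs c j ≤ d)) → pvGci hs n c d i = 0 := by
  intro i
  fun_induction pvGci hs n c d i with
  | case1 i h hgap ih => intro hyp; exact absurd hgap (hyp i (le_refl _) h.2)
  | case2 i h hgap ih => intro hyp; exact ih (fun j hj1 hj2 => hyp j (by omega) hj2)
  | case3 i h => intro _; rfl

-- A's is_possible loop computes "the full greedy count reaches r"
theorem pvAPossLoop_eq (hs : List Int) (n c r d : Int) (hok : 1 ≤ c ∨ n - c < 0) :
    ∀ (fuel : Nat) (i brig : Int), 0 ≤ i → (n - c + 1 - i).toNat ≤ fuel →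
    pvAPossLoop hs n c r d fuel i brig = decide (r ≤ brig + pvGci hs n c d i) := by
  intro fuel
  induction fuel with
  | zero =>
    intro i brig hi0 h
    have hi : ¬(1 ≤ c ∧ i ≤ n - c) := by omega
    rw [pvAPossLoop, pvGci_zero hs n c d i hi]
    rw [decide_eq_decide]
    omega
  | succ m ih =>
    intro i brig hi0 h
    rw [pvAPossLoop]
    by_cases hi : i ≤ n - c
    · have hc : 1 ≤ c := by rcases hok with hx | hx; exacts [hx, by omega]
      rw [if_pos hi]
      by_cases hg : PySem.List.pyGetD hs (i + c - 1) 0 - PySem.List.pyGetD hs i 0 ≤ d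
      · rw [if_pos hg]
        rw [pvGci_unfold_pos hs n c d i ⟨hc, hi⟩ hg]
        by_cases hr : brig + 1 ≥ r
        · rw [if_pos hr]
          have hle : r ≤ brig + (1 + pvGci hs n c d (i + c)) := by
            have := pvGci_nonneg hs n c d (i + c); omega
          simp [hle]
        · rw [if_neg hr, ih (i + c) (brig + 1) (by omega) (by omega)]
          rw [decide_eq_decide]
          omega
      · rw [if_neg hg]
        rw [pvGci_unfold_neg hs n c d i ⟨hc, hi⟩ hg]
        by_cases hr : brig ≥ r
        · rw [if_pos hr]
          have hle : r ≤ brig + pvGci hs n c d (i + 1) := by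
            have := pvGci_nonneg hs n c d (i + 1); omega
          simp [hle]
        · rw [if_neg hr, ih (i + 1) brig (by omega) (by omega)]
    · rw [if_neg hi, pvGci_zero hs n c d i (by omega)]
      rw [decide_eq_decide]
      omega

-- B's brigades loop computes the full greedy count
theorem pvBBrigLoop_eq (hs : List Int) (n c d : Int) (hok : 1 ≤ c ∨ n - c < 0) :
    ∀ (fuel : Nat) (i count : Int), 0 ≤ i → (n - c + 1 - i).toNat ≤ fuel →
    pvBBrigLoop hs n c d fuel i count = count + pvGci hs n c d i := by
  intro fuel
  induction fuel with
  | zero =>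
    intro i count hi0 h
    rw [pvBBrigLoop, pvGci_zero hs n c d i (by omega)]
    omega
  | succ m ih =>
    intro i count hi0 h
    rw [pvBBrigLoop]
    by_cases hi : i ≤ n - c
    · have hc : 1 ≤ c := by rcases hok with hx | hx; exacts [hx, by omega]
      rw [if_pos hi]
      by_cases hg : PySem.List.pyGetD hs (i + c - 1) 0 - PySem.List.pyGetD hs i 0 ≤ d
      · rw [if_pos hg, ih (i + c) (count + 1) (by omega) (by omega),
          pvGci_unfold_pos hs n c d i ⟨hc, hi⟩ hg]
        omega
      · rw [if_neg hg, ih (i + 1) count (by omega) (by omega),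
          pvGci_unfold_neg hs n c d i ⟨hc, hi⟩ hg]
    · rw [if_neg hi, pvGci_zero hs n c d i (by omega)]
      omega

-- A's binary search with a monotone predicate: it returns the least feasible value ≥ 0,
-- or `ans` (with everything in [0, ans] infeasible) if it never succeeds.
theorem pvABsearch_min (P : Int → Bool)
    (mono : ∀ d d', d ≤ d' → P d = true → P d' = true) :
    ∀ (fuel : Nat) (l rt ans : Int), (rt - l + 1).toNat ≤ fuel → 0 ≤ l →
    (∀ d, 0 ≤ d → d < l → P d = false) →
    ((rt = ans) ∨ (P ans = true ∧ rt = ans - 1 ∧ 0 ≤ ans)) →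
    (P (pvABsearch P fuel l rt ans) = true ∧ 0 ≤ pvABsearch P fuel l rt ans ∧
       ∀ d, 0 ≤ d → d < pvABsearch P fuel l rt ans → P d = false)
    ∨ (pvABsearch P fuel l rt ans = ans ∧ rt = ans ∧
       ∀ d, 0 ≤ d → d ≤ ans → P d = false) := by
  intro fuel
  induction fuel with
  | zero =>
    intro l rt ans hfuel hl hL hInv
    have hlt : rt < l := by omega
    rw [pvABsearch]
    rcases hInv with h1 | ⟨hp, hr, ha⟩
    · exact Or.inr ⟨rfl, h1, fun d hd1 hd2 => hL d hd1 (by omega)⟩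
    · exact Or.inl ⟨hp, ha, fun d hd1 hd2 => hL d hd1 (by omega)⟩
  | succ m ih =>
    intro l rt ans hfuel hl hL hInv
    rw [pvABsearch]
    by_cases hlr : l ≤ rt
    · rw [if_pos hlr]
      obtain ⟨hm1, hm2⟩ := PySem.Int.floordiv_two_mid_bounds hlr
      set mid := PySem.Int.floordiv (l + rt) 2 with hmid
      by_cases hp : P mid = true
      · rw [if_pos hp]
        rcases ih l (mid - 1) mid (by omega) hl hL (Or.inr ⟨hp, rfl, by omega⟩) with
          hgood | ⟨_, habs, _⟩
        · exact Or.inl hgood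
        · omega
      · rw [if_neg hp]
        refine ih (mid + 1) rt ans (by omega) (by omega) ?_ hInv
        intro d hd1 hd2
        by_cases hdl : d < l
        · exact hL d hd1 hdl
        · rcases Bool.eq_false_or_eq_true (P d) with ht | hf
          · exact absurd (mono d mid (by omega) ht) hp
          · exact hf
    · rw [if_neg hlr]
      rcases hInv with h1 | ⟨hp, hr, ha⟩
      · exact Or.inr ⟨rfl, h1, fun d hd1 hd2 => hL d hd1 (by omega)⟩
      · exact Or.inl ⟨hp, ha, fun d hd1 hd2 => hL d hd1 (by omega)⟩

-- B's bisection over the gap list: returns the first index whose gap is feasible (or the length)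
theorem pvBBisect_spec (gaps : List Int) (F : Int → Bool)
    (monoQ : ∀ (j k : Int), 0 ≤ j → j ≤ k → k < (gaps.length : Int) →
      F (PySem.List.pyGetD gaps j 0) = true → F (PySem.List.pyGetD gaps k 0) = true) :
    ∀ (fuel : Nat) (lo hi : Int), (hi - lo).toNat ≤ fuel → 0 ≤ lo → lo ≤ hi →
    hi ≤ (gaps.length : Int) →
    (∀ k, 0 ≤ k → k < lo → F (PySem.List.pyGetD gaps k 0) = false) →
    (∀ k, hi ≤ k → k < (gaps.length : Int) → F (PySem.List.pyGetD gaps k 0) = true) →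
    0 ≤ pvBBisect gaps F fuel lo hi ∧ pvBBisect gaps F fuel lo hi ≤ (gaps.length : Int) ∧
    (∀ k, 0 ≤ k → k < pvBBisect gaps F fuel lo hi → F (PySem.List.pyGetD gaps k 0) = false) ∧
    (∀ k, pvBBisect gaps F fuel lo hi ≤ k → k < (gaps.length : Int) →
      F (PySem.List.pyGetD gaps k 0) = true) := by
  intro fuel
  induction fuel with
  | zero =>
    intro lo hi hfuel h0 hlh hhl hlow hhigh
    have : hi = lo := by omega
    rw [pvBBisect]
    exact ⟨h0, by omega, hlow, fun k hk1 hk2 => hhigh k (by omega) hk2⟩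
  | succ m ih =>
    intro lo hi hfuel h0 hlh hhl hlow hhigh
    rw [pvBBisect]
    by_cases hlt : lo < hi
    · rw [if_pos hlt]
      obtain ⟨hm1, hm2⟩ := PySem.Int.floordiv_two_mid_bounds (le_of_lt hlt)
      have hmlt : PySem.Int.floordiv (lo + hi) 2 < hi := by
        rw [PySem.Int.floordiv_lt_iff_lt_mul (by omega)]
        omega
      set mid := PySem.Int.floordiv (lo + hi) 2 with hmid
      by_cases hp : F (PySem.List.pyGetD gaps mid 0) = true
      · rw [if_pos hp]
        refine ih lo mid (by omega) h0 (by omega) (by omega) hlow ?_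
        intro k hk1 hk2
        exact monoQ mid k (by omega) hk1 hk2 hp
      · rw [if_neg hp]
        refine ih (mid + 1) hi (by omega) (by omega) (by omega) hhl ?_ hhigh
        intro k hk1 hk2
        by_cases hkl : k < lo
        · exact hlow k hk1 hkl
        · rcases Bool.eq_false_or_eq_true (F (PySem.List.pyGetD gaps k 0)) with ht | hf
          · exact absurd (monoQ k mid hk1 (by omega) (by omega) ht) hp
          · exact hf
    · rw [if_neg hlt]
      have : hi = lo := by omega
      exact ⟨h0, by omega, hlow, fun k hk1 hk2 => hhigh k (by omega) hk2⟩

-- elements of a ≤-sorted list are monotone in the (Int) index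
theorem pvEl_mono (hs : List Int) (hord : hs.Pairwise (· ≤ ·)) (a b : Int)
    (ha : 0 ≤ a) (hab : a ≤ b) (hb : b < (hs.length : Int)) :
    PySem.List.pyGetD hs a 0 ≤ PySem.List.pyGetD hs b 0 := by
  rw [PySem.List.pyGetD_eq_getElem hs 0 ha (by omega), PySem.List.pyGetD_eq_getElem hs 0 (by omega) hb]
  rcases eq_or_lt_of_le hab with heq | hlt
  · subst heq; exact le_refl _
  · exact List.pairwise_iff_getElem.mp hord a.toNat b.toNat (by omega) (by omega) (by omega)

theorem pvLast_eq (hs : List Int) (hne : hs ≠ []) :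
    PySem.List.pyGetD hs (-1) 0 = PySem.List.pyGetD hs ((hs.length : Int) - 1) 0 := by
  have hlen : 0 < hs.length := List.length_pos_iff.mpr hne
  rw [PySem.List.pyGetD_neg_one hs 0 hne, List.getLast_eq_getElem,
    PySem.List.pyGetD_eq_getElem hs 0 (by omega) (by omega)]
  congr 1
  omega

-- if a value d admits any feasible comparison pattern, either no window fits (so the count is 0)
-- or the largest candidate gap ≤ d produces the same greedy run
theorem pvFeas_step (hs : List Int) (n c r : Int) (gaps : List Int)
    (hmem : ∀ g, g ∈ gaps ↔ ∃ i, 0 ≤ i ∧ i ≤ n - c ∧ g = pvGap hs c i)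
    (d : Int) (hfeas : r ≤ pvGci hs n c d 0) :
    r ≤ 0 ∨ ∃ g, g ∈ gaps ∧ g ≤ d ∧ r ≤ pvGci hs n c g 0 := by
  rcases hmax : (gaps.filter (fun g => decide (g ≤ d))).max? with _ | g
  · left
    rw [List.max?_eq_none_iff] at hmax
    have hno : ∀ j, (0:Int) ≤ j → j ≤ n - c → ¬(pvGap hs c j ≤ d) := by
      intro j hj1 hj2 hle
      have hg : pvGap hs c j ∈ gaps := (hmem _).mpr ⟨j, hj1, hj2, rfl⟩
      have : pvGap hs c j ∈ (gaps.filter (fun g => decide (g ≤ d))) :=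
        List.mem_filter.mpr ⟨hg, by simpa using hle⟩
      rw [hmax] at this
      exact absurd this (List.not_mem_nil)
    have := pvGci_zero_of_no_gap hs n c d 0 hno
    omega
  · right
    rw [List.max?_eq_some_iff] at hmax
    obtain ⟨hgmem, hgmax⟩ := hmax
    obtain ⟨hgg, hgd⟩ := List.mem_filter.mp hgmem
    have hgd' : g ≤ d := by simpa using hgd
    refine ⟨g, hgg, hgd', ?_⟩
    have hcong : pvGci hs n c d 0 = pvGci hs n c g 0 := by
      apply pvGci_congr hs n c d g 0
      intro j hj1 hj2
      constructor
      · intro hle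
        exact le_of_le_of_eq (hgmax _ (List.mem_filter.mpr
          ⟨(hmem _).mpr ⟨j, hj1, hj2, rfl⟩, by simpa using hle⟩)) rfl
      · intro hle
        exact le_trans hle hgd'
    omega

-- consequence: with is_possible(0) false, no value below a bound all of whose candidate gaps
-- are infeasible can be feasible
theorem pvNoFeas_below (hs : List Int) (n c r : Int) (gaps : List Int)
    (hmem : ∀ g, g ∈ gaps ↔ ∃ i, 0 ≤ i ∧ i ≤ n - c ∧ g = pvGap hs c i)
    (h0 : ¬ r ≤ pvGci hs n c 0 0) (G : Int)
    (hgaps : ∀ g ∈ gaps, g < G → ¬ r ≤ pvGci hs n c g 0) :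
    ∀ d, 0 ≤ d → d < G → ¬ r ≤ pvGci hs n c d 0 := by
  intro d hd1 hd2 hfeas
  rcases pvFeas_step hs n c r gaps hmem d hfeas with hr0 | ⟨g, hg1, hg2, hg3⟩
  · have := pvGci_nonneg hs n c 0 0
    omega
  · exact hgaps g hg1 (by omega) hg3

theorem pvNoFeas_all (hs : List Int) (n c r : Int) (gaps : List Int)
    (hmem : ∀ g, g ∈ gaps ↔ ∃ i, 0 ≤ i ∧ i ≤ n - c ∧ g = pvGap hs c i)
    (h0 : ¬ r ≤ pvGci hs n c 0 0)
    (hgaps : ∀ g ∈ gaps, ¬ r ≤ pvGci hs n c g 0) :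
    ∀ d, 0 ≤ d → ¬ r ≤ pvGci hs n c d 0 := by
  intro d hd1 hfeas
  rcases pvFeas_step hs n c r gaps hmem d hfeas with hr0 | ⟨g, hg1, _, hg3⟩
  · have := pvGci_nonneg hs n c 0 0
    omega
  · exact hgaps g hg1 hg3

-- B's program, with both loops replaced by their characterizations' shapes
def pvGapsOf (hs : List Int) (n c : Int) : List Int :=
  PySem.List.sorted
    (PySem.Set.ofList ((PySem.List.pyRange 0 (n - c + 1) 1).map
      (fun i => PySem.List.pyGetD hs (i + c - 1) 0 - PySem.List.pyGetD hs i 0)))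
    (fun x => x) false

def pvBSpec (hs : List Int) (n r c : Int) : Int :=
  if r ≤ pvGci hs n c 0 0 then 0
  else
    let gaps := pvGapsOf hs n c
    let lo := pvBBisect gaps (fun g => decide (r ≤ pvGci hs n c g 0)) (gaps.length + 1) 0
      (gaps.length : Int)
    if lo < (gaps.length : Int) then PySem.List.pyGetD gaps lo 0
    else PySem.List.pyGetD hs (-1) 0 - PySem.List.pyGetD hs 0 0

theorem pvA_eval (heights : List Int) (n r c : Int)
    (hpre : (1 ≤ c ∧ n ≤ (heights.length : Int)) ∨ n < c) :
    get_min_max_inconvenience n r c heights =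
    pvABsearch
      (fun d => decide (r ≤ pvGci (PySem.List.sorted heights (fun x => x) false) n c d 0))
      ((PySem.List.pyGetD (PySem.List.sorted heights (fun x => x) false) (-1) 0 -
        PySem.List.pyGetD (PySem.List.sorted heights (fun x => x) false) 0 0) + 2).toNat 0
      (PySem.List.pyGetD (PySem.List.sorted heights (fun x => x) false) (-1) 0 -
        PySem.List.pyGetD (PySem.List.sorted heights (fun x => x) false) 0 0)
      (PySem.List.pyGetD (PySem.List.sorted heights (fun x => x) false) (-1) 0 -
        PySem.List.pyGetD (PySem.List.sorted heights (fun x => x) false) 0 0) := by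
  simp only [get_min_max_inconvenience]
  congr 1
  funext d
  rw [pvAPossLoop_eq (PySem.List.sorted heights (fun x => x) false) n c r d
    (by rcases hpre with hx | hx; exacts [Or.inl hx.1, Or.inr (by omega)]) _ 0 0
    (le_refl 0) (by rw [PySem.List.length_sorted]; rcases hpre with hx | hx <;> omega)]
  norm_num

theorem pvB_eval (heights : List Int) (n r c : Int)
    (hpre : (1 ≤ c ∧ n ≤ (heights.length : Int)) ∨ n < c) :
    get_min_max_inconvenience_alt n r c heights =
    pvBSpec (PySem.List.sorted heights (fun x => x) false) n r c := by
  simp only [get_min_max_inconvenience_alt, pvBSpec, pvGapsOf]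
  have hlen : (PySem.List.sorted heights (fun x => x) false).length = heights.length :=
    PySem.List.length_sorted heights (fun x => x) false
  have hbr : ∀ d : Int,
      pvBBrigLoop (PySem.List.sorted heights (fun x => x) false) n c d
        ((PySem.List.sorted heights (fun x => x) false).length + 1) 0 0 =
      pvGci (PySem.List.sorted heights (fun x => x) false) n c d 0 := by
    intro d
    rw [pvBBrigLoop_eq (PySem.List.sorted heights (fun x => x) false) n c d
      (by rcases hpre with hx | hx; exacts [Or.inl hx.1, Or.inr (by omega)]) _ 0 0
      (le_refl 0) (by rw [hlen]; rcases hpre with hx | hx <;> omega)]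
    omega
  simp only [hbr, ge_iff_le]

theorem pvMain (hs : List Int) (n r c : Int)
    (hpre : (1 ≤ c ∧ n ≤ (hs.length : Int)) ∨ n < c)
    (hne : hs ≠ []) (hord : hs.Pairwise (· ≤ ·)) :
    pvABsearch (fun d => decide (r ≤ pvGci hs n c d 0))
      ((PySem.List.pyGetD hs (-1) 0 - PySem.List.pyGetD hs 0 0) + 2).toNat 0
      (PySem.List.pyGetD hs (-1) 0 - PySem.List.pyGetD hs 0 0)
      (PySem.List.pyGetD hs (-1) 0 - PySem.List.pyGetD hs 0 0)
    = pvBSpec hs n r c := by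
  have hlpos : 0 < hs.length := List.length_pos_iff.mpr hne
  have hkey : ∀ i : Int, 0 ≤ i → i ≤ n - c → 1 ≤ c ∧ n ≤ (hs.length : Int) := by
    intro i h1 h2
    rcases hpre with hx | hx
    · exact hx
    · omega
  have hlast := pvLast_eq hs hne
  have hr0nn : 0 ≤ PySem.List.pyGetD hs (-1) 0 - PySem.List.pyGetD hs 0 0 := by
    rw [hlast]
    have := pvEl_mono hs hord 0 ((hs.length : Int) - 1) (le_refl 0) (by omega) (by omega)
    omega
  set r0 := PySem.List.pyGetD hs (-1) 0 - PySem.List.pyGetD hs 0 0 with hr0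
  have hgapnn : ∀ i, 0 ≤ i → i ≤ n - c → 0 ≤ pvGap hs c i := by
    intro i h1 h2
    obtain ⟨hc', hn'⟩ := hkey i h1 h2
    have := pvEl_mono hs hord i (i + c - 1) h1 (by omega) (by omega)
    unfold pvGap; omega
  have hgapub : ∀ i, 0 ≤ i → i ≤ n - c → pvGap hs c i ≤ r0 := by
    intro i h1 h2
    obtain ⟨hc', hn'⟩ := hkey i h1 h2
    have hu := pvEl_mono hs hord (i + c - 1) ((hs.length : Int) - 1) (by omega) (by omega) (by omega)
    have hl := pvEl_mono hs hord 0 i (le_refl 0) h1 (by omega)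
    rw [hr0, hlast]
    unfold pvGap; omega
  set gaps := pvGapsOf hs n c with hg
  have hmem : ∀ g, g ∈ gaps ↔ ∃ i, 0 ≤ i ∧ i ≤ n - c ∧ g = pvGap hs c i := by
    intro g
    rw [hg]
    unfold pvGapsOf
    rw [PySem.List.mem_sorted, PySem.Set.mem_ofList, List.mem_map]
    constructor
    · rintro ⟨i, hi, rfl⟩
      rw [PySem.List.mem_pyRange_one] at hi
      exact ⟨i, hi.1, by omega, rfl⟩
    · rintro ⟨i, h1, h2, rfl⟩
      exact ⟨i, PySem.List.mem_pyRange_one.mpr ⟨h1, by omega⟩, rfl⟩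
  have hpw : gaps.Pairwise (· < ·) := by
    rw [hg]; unfold pvGapsOf; exact PySem.List.sorted_ofList_pairwise_lt _
  have hgord : gaps.Pairwise (· ≤ ·) := hpw.imp (fun h => le_of_lt h)
  have hmonoP : ∀ d d' : Int, d ≤ d' →
      decide (r ≤ pvGci hs n c d 0) = true → decide (r ≤ pvGci hs n c d' 0) = true := by
    intro d d' hdd
    simp only [decide_eq_true_iff]
    intro h
    exact le_trans h (pvGci_d_mono hs n c d d' hdd 0)
  have HA := pvABsearch_min _ hmonoP (r0 + 2).toNat 0 r0 r0 (by omega) (le_refl 0)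
    (fun d h1 h2 => absurd h1 (by omega)) (Or.inl rfl)
  set RA := pvABsearch (fun d => decide (r ≤ pvGci hs n c d 0)) (r0 + 2).toNat 0 r0 r0 with hRA
  simp only [pvBSpec, ← hg]
  by_cases hP0 : r ≤ pvGci hs n c 0 0
  · rw [if_pos hP0]
    rcases HA with ⟨hfeasA, hnnA, hminA⟩ | ⟨heqA, _, hallA⟩
    · by_cases h : 0 < RA
      · have := hminA 0 (le_refl 0) h
        simp [hP0] at this
      · omega
    · have := hallA 0 (le_refl 0) hr0nn
      simp [hP0] at this
  · rw [if_neg hP0]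
    have hmonoQ : ∀ j k : Int, 0 ≤ j → j ≤ k → k < (gaps.length : Int) →
        (fun g => decide (r ≤ pvGci hs n c g 0)) (PySem.List.pyGetD gaps j 0) = true →
        (fun g => decide (r ≤ pvGci hs n c g 0)) (PySem.List.pyGetD gaps k 0) = true := by
      intro j k h1 h2 h3 h4
      exact hmonoP _ _ (pvEl_mono gaps hgord j k h1 h2 h3) h4
    obtain ⟨hL0, hLlen, hLlow, hLhigh⟩ := pvBBisect_spec gaps (fun g => decide (r ≤ pvGci hs n c g 0)) hmonoQ (gaps.length + 1) 0
      (gaps.length : Int) (by omega) (le_refl 0) (by omega) (le_refl _)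
      (fun k h1 h2 => absurd h1 (by omega)) (fun k h1 h2 => absurd h2 (by omega))
    set L := pvBBisect gaps (fun g => decide (r ≤ pvGci hs n c g 0)) (gaps.length + 1) 0
      (gaps.length : Int) with hL
    by_cases hlt : L < (gaps.length : Int)
    · rw [if_pos hlt]
      have hgstar_mem : PySem.List.pyGetD gaps L 0 ∈ gaps := by
        rw [PySem.List.pyGetD_eq_getElem gaps 0 hL0 hlt]
        exact List.getElem_mem _
      obtain ⟨i0, hi01, hi02, hi0eq⟩ := (hmem _).mp hgstar_mem
      have hfeasg : r ≤ pvGci hs n c (PySem.List.pyGetD gaps L 0) 0 := by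
        have := hLhigh L (le_refl _) hlt
        simpa using this
      have hbound : ∀ g ∈ gaps, g < PySem.List.pyGetD gaps L 0 → ¬ r ≤ pvGci hs n c g 0 := by
        intro g hgmem hglt hgfeas
        obtain ⟨k, hklt, hkeq⟩ := List.mem_iff_getElem.mp hgmem
        have hkg : PySem.List.pyGetD gaps (k : Int) 0 = g := by
          rw [PySem.List.pyGetD_eq_getElem gaps 0 (by omega) (by omega)]
          simpa using hkeq
        by_cases hkL : (k : Int) < L
        · have := hLlow (k : Int) (by omega) hkL
          rw [hkg] at this
          simp [hgfeas] at this
        · have := pvEl_mono gaps hgord L (k : Int) hL0 (by omega) (by omega)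
          rw [hkg] at this
          omega
      have hnofeas := pvNoFeas_below hs n c r gaps hmem hP0 (PySem.List.pyGetD gaps L 0) hbound
      rcases HA with ⟨hfeasA, hnnA, hminA⟩ | ⟨heqA, _, hallA⟩
      · have h1 : ¬ RA < PySem.List.pyGetD gaps L 0 := by
          intro hx
          exact hnofeas RA hnnA hx (by simpa using hfeasA)
        have h2 : ¬ PySem.List.pyGetD gaps L 0 < RA := by
          intro hx
          have hgnn : 0 ≤ PySem.List.pyGetD gaps L 0 := hi0eq ▸ hgapnn i0 hi01 hi02
          have := hminA _ hgnn hx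
          simp [hfeasg] at this
        omega
      · have hub : PySem.List.pyGetD gaps L 0 ≤ r0 := hi0eq ▸ hgapub i0 hi01 hi02
        have hlb : 0 ≤ PySem.List.pyGetD gaps L 0 := hi0eq ▸ hgapnn i0 hi01 hi02
        have := hallA (PySem.List.pyGetD gaps L 0) hlb hub
        simp [hfeasg] at this
    · rw [if_neg hlt]
      have hgaps : ∀ g ∈ gaps, ¬ r ≤ pvGci hs n c g 0 := by
        intro g hgmem hgfeas
        obtain ⟨k, hklt, hkeq⟩ := List.mem_iff_getElem.mp hgmem
        have hkg : PySem.List.pyGetD gaps (k : Int) 0 = g := by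
          rw [PySem.List.pyGetD_eq_getElem gaps 0 (by omega) (by omega)]
          simpa using hkeq
        have := hLlow (k : Int) (by omega) (by omega)
        rw [hkg] at this
        simp [hgfeas] at this
      have hnofeas := pvNoFeas_all hs n c r gaps hmem hP0 hgaps
      rcases HA with ⟨hfeasA, hnnA, _⟩ | ⟨heqA, _, _⟩
      · exact absurd (by simpa using hfeasA) (hnofeas RA hnnA)
      · exact heqA

-- ===== VERDICT (by name: the statement is the Claim_ definition above) =====
theorem get_min_max_inconvenience_spec : Claim_equal_get_min_max_inconvenience := by
  intro n r c heights _dom pre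
  obtain ⟨hne0, hpre⟩ := pre
  unfold Spec_get_min_max_inconvenience
  rw [pvA_eval heights n r c hpre, pvB_eval heights n r c hpre]
  apply pvMain
  · rw [PySem.List.length_sorted]; exact hpre
  · intro h
    have := PySem.List.length_sorted heights (fun x => x) false
    rw [h] at this
    simp at this
    exact hne0 (List.length_eq_zero_iff.mp this.symm)
  · exact PySem.List.sorted_pairwise heights (fun x => x)
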